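-- pv_equiv track=rewrite | github.com/Walkiiiy/DataRecipe | src/scripts/plot_training_trajectory_csv.py | infer_y_cols
-- ===== SOURCE A (Python) =====
-- from typing import Dict, List
--
-- def _to_float(value: str) -> float:
--     text = value.strip()
--     if not text:
--         return float("nan")
--     return float(text)
--
-- def infer_y_cols(rows: List[Dict[str, str]], x_col: str) -> List[str]:
--     keys = list(rows[0].keys())
--     y_cols: List[str] = []
--     for key in keys:
--         if key == x_col:
--             continue
--         numeric = True
--         for row in rows:
--             try:
--                 _to_float(row[key])
--             except Exception:
--                 numeric = False
--                 break
--         if numeric: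
--             y_cols.append(key)
--     return y_cols
-- ===== SOURCE B (Python) =====
-- from typing import Dict, List
--
--
-- def _ok(row: Dict[str, str], key: str) -> bool:
--     try:
--         float(row[key].strip() or "nan")
--         return True
--     except Exception:
--         return False
--
--
-- def infer_y_cols(rows: List[Dict[str, str]], x_col: str) -> List[str]:
--     # Candidate-narrowing: start from all non-x columns, drop survivors row by row.
--     candidates = [k for k in rows[0] if k != x_col]
--     for row in rows:
--         candidates = [k for k in candidates if _ok(row, k)]
--     return candidates
-- ===== Notes on version B (the rewrite author's own statement) =====
-- stated objective: alternative
-- what changed: A scans all rows per column with an early break and appends survivors; B starts from the full list of non-x columns and narrows it row by row (iterative candidate filtering), never appending.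
import Mathlib
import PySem

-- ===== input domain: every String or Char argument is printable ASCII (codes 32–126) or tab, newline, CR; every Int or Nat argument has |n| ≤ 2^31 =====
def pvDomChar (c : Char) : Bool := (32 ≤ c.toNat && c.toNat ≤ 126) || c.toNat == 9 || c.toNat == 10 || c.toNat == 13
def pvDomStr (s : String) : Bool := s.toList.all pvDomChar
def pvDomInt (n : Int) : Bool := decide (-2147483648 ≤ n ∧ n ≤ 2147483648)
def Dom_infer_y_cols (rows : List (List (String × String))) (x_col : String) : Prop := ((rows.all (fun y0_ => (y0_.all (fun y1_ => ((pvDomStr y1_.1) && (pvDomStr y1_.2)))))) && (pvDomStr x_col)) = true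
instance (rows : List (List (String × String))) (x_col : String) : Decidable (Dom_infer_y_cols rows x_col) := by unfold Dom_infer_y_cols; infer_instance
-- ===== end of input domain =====

-- B replaces A's per-column scan over all rows (with an early break and appends) by
-- iterative candidate narrowing: the non-x key list is filtered row by row (objective: alternative).

-- ===== PORT A =====
-- Emulation of the Python built-in float(str) SUCCESS (PySem has no float primitive;
-- only whether float() raises matters here, never the value), recursive-descent style:
-- digit runs with single underscores between digits, optional fraction and exponent,
-- signed, and the words inf/infinity/nan case-insensitively.
def pvDigCont : List Char → List Char
  | '_' :: c :: rest => if c.isDigit then pvDigCont rest else '_' :: c :: rest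
  | c :: rest => if c.isDigit then pvDigCont rest else c :: rest
  | [] => []

def pvDigRun : List Char → Option (List Char)
  | c :: rest => if c.isDigit then some (pvDigCont rest) else none
  | [] => none

def pvAfterExp (cs : List Char) : Bool :=
  let cs' := match cs with
    | c :: rest => if c = '+' ∨ c = '-' then rest else c :: rest
    | [] => []
  match pvDigRun cs' with
  | some [] => true
  | _ => false

def pvExpOpt : List Char → Bool
  | [] => true
  | c :: rest => if c = 'e' ∨ c = 'E' then pvAfterExp rest else false

def pvNumBody (cs : List Char) : Bool :=
  match cs with
  | '.' :: rest => (match pvDigRun rest with | some r => pvExpOpt r | none => false)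
  | _ =>
    match pvDigRun cs with
    | none => false
    | some [] => true
    | some ('.' :: r) =>
        (match r with
         | c :: _ =>
             if c.isDigit then (match pvDigRun r with | some r2 => pvExpOpt r2 | none => false)
             else pvExpOpt r
         | [] => true)
    | some ('e' :: r) => pvAfterExp r
    | some ('E' :: r) => pvAfterExp r
    | some _ => false

def pvFloatAccepts (cs : List Char) : Bool :=
  let body := match cs with
    | c :: rest => if c = '+' ∨ c = '-' then rest else c :: rest
    | [] => []
  let lo := PySem.Chars.lower body
  if lo = "inf".toList ∨ lo = "infinity".toList ∨ lo = "nan".toList then true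
  else pvNumBody body

-- _to_float(value) returns normally iff:
def pv_to_float_ok (value : String) : Bool :=
  let text := PySem.Chars.strip value.toList
  if text = [] then true else pvFloatAccepts text

-- `try: _to_float(row[key]) except Exception` — none = KeyError, also caught
def pvCellOk (row : List (String × String)) (key : String) : Bool :=
  match (PySem.Dict.ofList row).get? key with
  | some v => pv_to_float_ok v
  | none => false

-- A's inner `for row in rows: … break` loop on the flag `numeric`
def pvColNumeric : List (List (String × String)) → String → Bool
  | [], _ => true
  | row :: rest, key => if pvCellOk row key then pvColNumeric rest key else false

def infer_y_cols (rows : List (List (String × String))) (x_col : String) : List String :=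
  match rows with
  | [] => []  -- unreachable under Pre_: rows[0] raises IndexError
  | r0 :: _ =>
    let keys := (PySem.Dict.ofList r0).keys
    keys.foldl (fun y_cols key =>
      if key == x_col then y_cols
      else if pvColNumeric rows key then y_cols ++ [key] else y_cols) []

-- ===== PORT B =====
-- B's emulation of float(str) success: a character-level DFA.  States: 0 start (after
-- sign), 1 int digits, 11 after '_' in int part, 2 after leading '.', 3 after '.'
-- following int digits, 4 fraction digits, 41 after '_' in fraction, 5 after e/E,
-- 6 after exponent sign, 7 exponent digits, 71 after '_' in exponent.
def pvRun : Nat → List Char → Bool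
  | q, [] => q == 1 || q == 3 || q == 4 || q == 7
  | q, c :: r =>
    match q with
    | 0 => if c.isDigit then pvRun 1 r else if c = '.' then pvRun 2 r else false
    | 1 => if c.isDigit then pvRun 1 r else if c = '_' then pvRun 11 r
           else if c = '.' then pvRun 3 r else if c = 'e' ∨ c = 'E' then pvRun 5 r else false
    | 11 => if c.isDigit then pvRun 1 r else false
    | 2 => if c.isDigit then pvRun 4 r else false
    | 3 => if c.isDigit then pvRun 4 r else if c = 'e' ∨ c = 'E' then pvRun 5 r else false
    | 4 => if c.isDigit then pvRun 4 r else if c = '_' then pvRun 41 r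
           else if c = 'e' ∨ c = 'E' then pvRun 5 r else false
    | 41 => if c.isDigit then pvRun 4 r else false
    | 5 => if c = '+' ∨ c = '-' then pvRun 6 r else if c.isDigit then pvRun 7 r else false
    | 6 => if c.isDigit then pvRun 7 r else false
    | 7 => if c.isDigit then pvRun 7 r else if c = '_' then pvRun 71 r else false
    | 71 => if c.isDigit then pvRun 7 r else false
    | _ => false

def pvFloatDFA (cs : List Char) : Bool :=
  let body := match cs with
    | c :: rest => if c = '+' ∨ c = '-' then rest else c :: rest
    | [] => []
  let lo := PySem.Chars.lower body
  if ["inf".toList, "infinity".toList, "nan".toList].contains lo then true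
  else pvRun 0 body

-- `try: float(row[key].strip() or "nan") except Exception`
def pvCellOkB (row : List (String × String)) (key : String) : Bool :=
  match (PySem.Dict.ofList row).get? key with
  | some v =>
      let t := PySem.Chars.strip v.toList
      pvFloatDFA (if t = [] then "nan".toList else t)
  | none => false

def infer_y_cols_alt (rows : List (List (String × String))) (x_col : String) : List String :=
  match rows with
  | [] => []  -- unreachable under Pre_
  | r0 :: _ =>
    let init := ((PySem.Dict.ofList r0).keys).filter (fun k => k != x_col)
    rows.foldl (fun cands row => cands.filter (fun k => pvCellOkB row k)) init

-- ===== PRECONDITION & SPEC =====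
-- A evaluates rows[0]: on rows = [] it raises IndexError, hence excluded.
def Pre_infer_y_cols (rows : List (List (String × String))) (x_col : String) : Prop := rows ≠ []
instance (rows : List (List (String × String))) (x_col : String) : Decidable (Pre_infer_y_cols rows x_col) := by unfold Pre_infer_y_cols; infer_instance
def pvWitness_infer_y_cols : (List (List (String × String))) × String := ([[("x", "1"), ("y", " 2.5 ")]], "x")

def Spec_infer_y_cols (rows : List (List (String × String))) (x_col : String) (out : List String) : Prop := out = infer_y_cols_alt rows x_col
instance (rows : List (List (String × String))) (x_col : String) (out : List String) : Decidable (Spec_infer_y_cols rows x_col out) := by unfold Spec_infer_y_cols; infer_instance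

-- ===== CLAIM (what is proved, stated in full; the proofs are below) =====
def Claim_equal_infer_y_cols : Prop := ∀ (rows : List (List (String × String))) (x_col : String), Dom_infer_y_cols rows x_col → Pre_infer_y_cols rows x_col → Spec_infer_y_cols rows x_col (infer_y_cols rows x_col)

-- ===== LEMMAS AND PROOFS =====

-- state 7 accepts exactly when the rest is a pure digit-run continuation
lemma run7_eq (cs : List Char) : pvRun 7 cs = decide (pvDigCont cs = []) := by
  induction cs using pvDigCont.induct with
  | case1 c rest hd ih => simp [pvRun, pvDigCont, hd, ih]
  | case2 c rest hd => simp [pvRun, pvDigCont, hd]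
  | case3 c rest hne hd ih =>
      have h_ : c ≠ '_' := by intro h; rw [h] at hd; exact absurd hd (by decide)
      simp [pvRun, pvDigCont, hd, h_, ih]
  | case4 c rest hne hd =>
      by_cases h_ : c = '_'
      · subst h_
        cases rest with
        | nil => simp [pvRun, pvDigCont]
        | cons a t => exact (hne a t rfl rfl).elim
      · simp [pvRun, pvDigCont, hd, h_]
  | case5 => simp [pvRun, pvDigCont]

-- state 5 is the exponent grammar
lemma run5_eq (cs : List Char) : pvRun 5 cs = pvAfterExp cs := by
  cases cs with
  | nil => simp [pvRun, pvAfterExp, pvDigRun]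
  | cons c r =>
    by_cases hs : c = '+' ∨ c = '-'
    · cases r with
      | nil => simp [pvRun, pvAfterExp, pvDigRun, hs]
      | cons d r2 =>
        by_cases hd : d.isDigit
        · simp only [pvRun, pvAfterExp, pvDigRun, hs, hd, if_true, if_pos, run7_eq]
          cases h : pvDigCont r2 <;> simp [h]
        · simp [pvRun, pvAfterExp, pvDigRun, hs, hd]
    · by_cases hd : c.isDigit
      · simp only [pvRun, pvAfterExp, pvDigRun, hs, hd, if_true, if_false, if_pos, if_neg, not_false_iff, run7_eq]
        cases h : pvDigCont r <;> simp [h]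
      · simp [pvRun, pvAfterExp, pvDigRun, hs, hd]

-- state 4 consumes a digit-run continuation then an optional exponent
lemma run4_eq (cs : List Char) : pvRun 4 cs = pvExpOpt (pvDigCont cs) := by
  induction cs using pvDigCont.induct with
  | case1 c rest hd ih => simp [pvRun, pvDigCont, hd, ih]
  | case2 c rest hd => simp [pvRun, pvDigCont, pvExpOpt, hd]
  | case3 c rest hne hd ih =>
      have h_ : c ≠ '_' := by intro h; rw [h] at hd; exact absurd hd (by decide)
      simp [pvRun, pvDigCont, hd, h_, ih]
  | case4 c rest hne hd =>
      by_cases h_ : c = '_'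
      · subst h_
        cases rest with
        | nil => simp [pvRun, pvDigCont, pvExpOpt]
        | cons a t => exact (hne a t rfl rfl).elim
      · by_cases he : c = 'e' ∨ c = 'E'
        · simp [pvRun, pvDigCont, pvExpOpt, hd, h_, he, run5_eq]
        · simp [pvRun, pvDigCont, pvExpOpt, hd, h_, he]
  | case5 => simp [pvRun, pvDigCont, pvExpOpt]

-- what A's grammar does after the leading digit of the integer part
def pvAfter1 : List Char → Bool
  | [] => true
  | c :: r =>
      if c = '.' then
        (match r with
         | c2 :: _ =>
             if c2.isDigit then (match pvDigRun r with | some r2 => pvExpOpt r2 | none => false)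
             else pvExpOpt r
         | [] => true)
      else if c = 'e' ∨ c = 'E' then pvAfterExp r
      else false

lemma run3_eq (r : List Char) : pvRun 3 r = pvAfter1 ('.' :: r) := by
  cases r with
  | nil => simp [pvRun, pvAfter1]
  | cons c r2 =>
    by_cases hd : c.isDigit
    · simp [pvRun, pvAfter1, pvDigRun, hd, run4_eq]
    · by_cases he : c = 'e' ∨ c = 'E'
      · simp [pvRun, pvAfter1, pvExpOpt, hd, he, run5_eq]
      · simp [pvRun, pvAfter1, pvExpOpt, hd, he]

lemma run1_eq (cs : List Char) : pvRun 1 cs = pvAfter1 (pvDigCont cs) := by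
  induction cs using pvDigCont.induct with
  | case1 c rest hd ih => simp [pvRun, pvDigCont, hd, ih]
  | case2 c rest hd => simp [pvRun, pvDigCont, pvAfter1, hd]
  | case3 c rest hne hd ih =>
      have h_ : c ≠ '_' := by intro h; rw [h] at hd; exact absurd hd (by decide)
      simp [pvRun, pvDigCont, hd, h_, ih]
  | case4 c rest hne hd =>
      by_cases h_ : c = '_'
      · subst h_
        cases rest with
        | nil => simp [pvRun, pvDigCont, pvAfter1]
        | cons a t => exact (hne a t rfl rfl).elim
      · by_cases hp : c = '.'
        · subst hp
          have hL : pvRun 1 ('.' :: rest) = pvRun 3 rest := by simp [pvRun]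
          have hR : pvDigCont ('.' :: rest) = '.' :: rest := by simp [pvDigCont]
          rw [hL, hR, run3_eq]
        · by_cases he : c = 'e' ∨ c = 'E'
          · simp [pvRun, pvDigCont, pvAfter1, hd, h_, hp, he, run5_eq]
          · simp [pvRun, pvDigCont, pvAfter1, hd, h_, hp, he]
  | case5 => simp [pvRun, pvDigCont, pvAfter1]

lemma run0_eq (cs : List Char) : pvRun 0 cs = pvNumBody cs := by
  cases cs with
  | nil => simp [pvRun, pvNumBody, pvDigRun]
  | cons c rest =>
    by_cases hp : c = '.'
    · subst hp
      cases rest with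
      | nil => simp [pvRun, pvNumBody, pvDigRun]
      | cons d r2 =>
        by_cases hd : d.isDigit
        · simp [pvRun, pvNumBody, pvDigRun, hd, run4_eq]
        · simp [pvRun, pvNumBody, pvDigRun, hd]
    · by_cases hd : c.isDigit
      · have h1 : pvRun 0 (c :: rest) = pvAfter1 (pvDigCont rest) := by
          simp [pvRun, hd, run1_eq]
        have h2 : pvNumBody (c :: rest) =
            (match pvDigRun (c :: rest) with
             | none => false
             | some [] => true
             | some ('.' :: r) =>
                 (match r with
                  | c2 :: _ =>
                      if c2.isDigit then (match pvDigRun r with | some r2 => pvExpOpt r2 | none => false)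
                      else pvExpOpt r
                  | [] => true)
             | some ('e' :: r) => pvAfterExp r
             | some ('E' :: r) => pvAfterExp r
             | some _ => false) := by
          rw [pvNumBody.eq_def]
          split
          · next heq => simp_all
          · rfl
        have h3 : pvDigRun (c :: rest) = some (pvDigCont rest) := by simp [pvDigRun, hd]
        rw [h1, h2, h3]
        cases h : pvDigCont rest with
        | nil => simp [pvAfter1]
        | cons d r2 =>
          by_cases hdp : d = '.'
          · subst hdp; simp [pvAfter1]
          · by_cases hde : d = 'e'
            · subst hde; simp [pvAfter1]
            · by_cases hdE : d = 'E'
              · subst hdE; simp [pvAfter1]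
              · have hA : pvAfter1 (d :: r2) = false := by
                  simp [pvAfter1, hdp, hde, hdE]
                rw [hA]
                split <;> simp_all
      · have h2 : pvNumBody (c :: rest) = false := by
          rw [pvNumBody.eq_def]
          split
          · next heq => simp_all
          · simp [pvDigRun, hd]
        simp [pvRun, hd, hp, h2]

lemma floatDFA_eq (cs : List Char) : pvFloatDFA cs = pvFloatAccepts cs := by
  have hc : ∀ lo : List Char,
      (([ "inf".toList, "infinity".toList, "nan".toList] : List (List Char)).contains lo = true) ↔
        (lo = "inf".toList ∨ lo = "infinity".toList ∨ lo = "nan".toList) := by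
    intro lo; simp
  unfold pvFloatDFA pvFloatAccepts
  simp only []
  by_cases h : PySem.Chars.lower (match cs with
      | c :: rest => if c = '+' ∨ c = '-' then rest else c :: rest
      | [] => []) = "inf".toList ∨ PySem.Chars.lower (match cs with
      | c :: rest => if c = '+' ∨ c = '-' then rest else c :: rest
      | [] => []) = "infinity".toList ∨ PySem.Chars.lower (match cs with
      | c :: rest => if c = '+' ∨ c = '-' then rest else c :: rest
      | [] => []) = "nan".toList
  · rw [if_pos ((hc _).mpr h), if_pos h]
  · rw [if_neg (fun hh => h ((hc _).mp hh)), if_neg h]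
    exact run0_eq _

-- the two cell tests agree (strip-empty means "nan", which float() accepts)
lemma cellOkB_eq (row : List (String × String)) (key : String) :
    pvCellOkB row key = pvCellOk row key := by
  unfold pvCellOkB pvCellOk pv_to_float_ok
  cases h : (PySem.Dict.ofList row).get? key with
  | none => rfl
  | some v =>
    simp only []
    by_cases ht : PySem.Chars.strip v.toList = []
    · simp only [ht, if_pos]
      simp [ht]
      decide
    · simp [ht, floatDFA_eq]

-- A's break loop is the `all` of the cell test
lemma colNumeric_eq_all (rows : List (List (String × String))) (key : String) :
    pvColNumeric rows key = rows.all (fun row => pvCellOk row key) := by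
  induction rows with
  | nil => rfl
  | cons r rest ih =>
      simp only [pvColNumeric, List.all_cons, ih]
      by_cases h : pvCellOk r key <;> simp [h]

-- B's row-by-row narrowing is a single filter by `all`
lemma foldl_filter_eq (rows : List (List (String × String))) (init : List String) :
    rows.foldl (fun cands row => cands.filter (fun k => pvCellOkB row k)) init =
      init.filter (fun k => rows.all (fun row => pvCellOkB row k)) := by
  induction rows generalizing init with
  | nil => simp
  | cons r rest ih =>
      rw [List.foldl_cons, ih, List.filter_filter]
      apply List.filter_congr
      intro k _
      simp [Bool.and_comm]

-- ===== VERDICT (by name: the statement is the Claim_ definition above) =====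
theorem infer_y_cols_spec : Claim_equal_infer_y_cols := by
  intro rows x_col _ hpre
  unfold Spec_infer_y_cols
  cases rows with
  | nil => exact absurd rfl hpre
  | cons r0 rest =>
    unfold infer_y_cols infer_y_cols_alt
    simp only []
    set keys := (PySem.Dict.ofList r0).keys with hkeys
    have hA : keys.foldl (fun y_cols key =>
        if key == x_col then y_cols
        else if pvColNumeric (r0 :: rest) key then y_cols ++ [key] else y_cols) [] =
        keys.filter (fun k => k != x_col && pvColNumeric (r0 :: rest) k) := by
      have hfg : (fun (y_cols : List String) key =>
          if key == x_col then y_cols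
          else if pvColNumeric (r0 :: rest) key then y_cols ++ [key] else y_cols) =
          (fun y_cols key =>
            if key != x_col && pvColNumeric (r0 :: rest) key then y_cols ++ [key]
            else y_cols) := by
        funext acc key
        by_cases h1 : key == x_col
        · simp [eq_of_beq h1]
        · have h1' : key ≠ x_col := by simpa using h1
          by_cases h2 : pvColNumeric (r0 :: rest) key <;> simp [h1, h1', h2]
      rw [hfg, PySem.List.foldl_append_if_eq_filter]
      simp
    rw [hA, foldl_filter_eq, List.filter_filter]
    apply List.filter_congr
    intro k _
    simp [colNumeric_eq_all, cellOkB_eq, Bool.and_comm]
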